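-- pv_equiv track=rewrite | github.com/ZaGrayWolf/KLIV_Intern | JETNet/JetNet.py | calculate_theoretical_flops
-- ===== SOURCE A (Python) =====
-- def _conv_flops(c_in, c_out, h, w, k, stride=1, padding=0, dilation=1):
--     """Calculates FLOPs and output shape for a Conv2d layer."""
--     h_out = (h + 2 * padding - dilation * (k - 1) - 1) // stride + 1
--     w_out = (w + 2 * padding - dilation * (k - 1) - 1) // stride + 1
--     # FLOPs = 2 * Cin * Cout * K^2 * Hout * Wout (MACs * 2)
--     flops = 2 * c_in * c_out * (k**2) * h_out * w_out
--     return flops, h_out, w_out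
--
-- def _bn_relu_flops(c, h, w):
--     """Approximates FLOPs for BatchNorm and ReLU."""
--     # BatchNorm: 4 FLOPs per element (2 mul, 2 add)
--     # ReLU: 1 FLOP per element
--     return c * h * w * 5
--
-- def _jetblock_flops(c_in, c_out, h, w, dilation=1):
--     """Calculates FLOPs for a JetBlock."""
--     # Conv1 + BN + ReLU
--     flops1, h1, w1 = _conv_flops(c_in, c_out, h, w, 3, padding=dilation, dilation=dilation)
--     flops1 += _bn_relu_flops(c_out, h1, w1)
--     # Conv2 + BN
--     flops2, h2, w2 = _conv_flops(c_out, c_out, h1, w1, 3, padding=1)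
--     flops2 += _bn_relu_flops(c_out, h2, w2) - (c_out * h2 * w2) # Subtract ReLU FLOPs
--     # Residual add + final ReLU
--     add_flops = c_out * h2 * w2
--     relu_flops = c_out * h2 * w2
--     total = flops1 + flops2 + add_flops + relu_flops
--     return total, h2, w2
--
-- def calculate_theoretical_flops(input_size, num_classes=21):
--     """Calculates the total theoretical FLOPs for the JetNet model."""
--     c, h, w = input_size
--     h_in, w_in = h, w
--     total_flops = 0
--
--     # Layer 1 (Conv + BN + ReLU)
--     f, h, w = _conv_flops(c, 32, h, w, 3, stride=2, padding=1)
--     total_flops += f + _bn_relu_flops(32, h, w)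
--
--     # Layer 2 (2 JetBlocks)
--     for _ in range(2):
--         f, h, w = _jetblock_flops(32, 32, h, w, dilation=1)
--         total_flops += f
--
--     # Layer 3 (Conv + BN + ReLU + 2 JetBlocks)
--     f, h, w = _conv_flops(32, 64, h, w, 3, stride=2, padding=1)
--     total_flops += f + _bn_relu_flops(64, h, w)
--     for _ in range(2):
--         f, h, w = _jetblock_flops(64, 64, h, w, dilation=2)
--         total_flops += f
--
--     # Layer 4 (Conv + BN + ReLU + 2 JetBlocks)
--     f, h, w = _conv_flops(64, 128, h, w, 3, stride=2, padding=1)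
--     total_flops += f + _bn_relu_flops(128, h, w)
--     for _ in range(2):
--         f, h, w = _jetblock_flops(128, 128, h, w, dilation=4)
--         total_flops += f
--
--     # Classifier (1x1 Conv)
--     f, h, w = _conv_flops(128, num_classes, h, w, 1)
--     total_flops += f
--
--     # Upsampling (Interpolate)
--     # Bilinear interpolation is approx. 7 FLOPs per output element
--     upsample_flops = 7 * num_classes * h_in * w_in
--     total_flops += upsample_flops
--
--     return total_flops
-- ===== SOURCE B (Python) =====
-- def calculate_theoretical_flops(input_size, num_classes=21):
--     """Table-driven reimplementation: the whole network flattened into one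
--     uniform list of conv descriptors (ci, co, k, stride, pad, dil, m), where m
--     is the per-output-element cost of the layer's BN/ReLU/residual tail."""
--     c, h, w = input_size
--     h_in, w_in = h, w
--     layers = [
--         (c, 32, 3, 2, 1, 1, 5),
--         (32, 32, 3, 1, 1, 1, 5), (32, 32, 3, 1, 1, 1, 6),
--         (32, 32, 3, 1, 1, 1, 5), (32, 32, 3, 1, 1, 1, 6),
--         (32, 64, 3, 2, 1, 1, 5),
--         (64, 64, 3, 1, 2, 2, 5), (64, 64, 3, 1, 1, 1, 6),
--         (64, 64, 3, 1, 2, 2, 5), (64, 64, 3, 1, 1, 1, 6),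
--         (64, 128, 3, 2, 1, 1, 5),
--         (128, 128, 3, 1, 4, 4, 5), (128, 128, 3, 1, 1, 1, 6),
--         (128, 128, 3, 1, 4, 4, 5), (128, 128, 3, 1, 1, 1, 6),
--         (128, num_classes, 1, 1, 0, 1, 0),
--     ]
--     total = 0
--     for ci, co, k, s, p, d, m in layers:
--         h = (h + 2 * p - d * (k - 1) - 1) // s + 1
--         w = (w + 2 * p - d * (k - 1) - 1) // s + 1
--         total += (2 * ci * k * k + m) * co * h * w
--     return total + 7 * num_classes * h_in * w_in
-- ===== Notes on version B (the rewrite author's own statement) =====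
-- stated objective: alternative
-- what changed: Replaces A's hard-coded layer-by-layer sequence (stem, two jetblocks per stage via helper calls, classifier, upsample) with a single fold over a flattened table of 16 conv descriptors, folding each layer's BN/ReLU/residual tail into a per-element multiplier m so one uniform update computes the whole network.
import Mathlib
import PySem

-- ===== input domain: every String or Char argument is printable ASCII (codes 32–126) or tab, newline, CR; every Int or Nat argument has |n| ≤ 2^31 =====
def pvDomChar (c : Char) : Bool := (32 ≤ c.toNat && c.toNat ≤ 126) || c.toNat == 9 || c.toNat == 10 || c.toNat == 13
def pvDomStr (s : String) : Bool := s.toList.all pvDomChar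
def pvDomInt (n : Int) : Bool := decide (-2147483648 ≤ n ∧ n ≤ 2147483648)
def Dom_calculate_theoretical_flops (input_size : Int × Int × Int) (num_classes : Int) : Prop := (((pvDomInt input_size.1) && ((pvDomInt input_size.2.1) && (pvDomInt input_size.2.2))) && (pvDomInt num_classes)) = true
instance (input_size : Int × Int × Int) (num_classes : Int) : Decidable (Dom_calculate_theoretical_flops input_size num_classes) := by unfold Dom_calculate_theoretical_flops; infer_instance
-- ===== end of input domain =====

-- B replaces A's hard-coded layer-by-layer sequence by a single fold over a flattened
-- table of conv descriptors (objective: simpler/alternative decomposition, not faster).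

-- ===== PORT A =====
def pvConvFlops (c_in c_out h w k stride padding dilation : Int) : Int × Int × Int :=
  let h_out := PySem.Int.floordiv (h + 2 * padding - dilation * (k - 1) - 1) stride + 1
  let w_out := PySem.Int.floordiv (w + 2 * padding - dilation * (k - 1) - 1) stride + 1
  let flops := 2 * c_in * c_out * (k ^ 2) * h_out * w_out
  (flops, h_out, w_out)

def pvBnReluFlops (c h w : Int) : Int := c * h * w * 5

def pvJetblockFlops (c_in c_out h w dilation : Int) : Int × Int × Int :=
  let r1 := pvConvFlops c_in c_out h w 3 1 dilation dilation
  let flops1 := r1.1 + pvBnReluFlops c_out r1.2.1 r1.2.2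
  let r2 := pvConvFlops c_out c_out r1.2.1 r1.2.2 3 1 1 1
  let flops2 := r2.1 + pvBnReluFlops c_out r2.2.1 r2.2.2 - (c_out * r2.2.1 * r2.2.2)
  let add_flops := c_out * r2.2.1 * r2.2.2
  let relu_flops := c_out * r2.2.1 * r2.2.2
  (flops1 + flops2 + add_flops + relu_flops, r2.2.1, r2.2.2)

def calculate_theoretical_flops (input_size : Int × Int × Int) (num_classes : Int) : Int :=
  let c := input_size.1
  let h := input_size.2.1
  let w := input_size.2.2
  let h_in := h
  let w_in := w
  let total_flops : Int := 0
  -- Layer 1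
  let r := pvConvFlops c 32 h w 3 2 1 1
  let h := r.2.1; let w := r.2.2
  let total_flops := total_flops + r.1 + pvBnReluFlops 32 h w
  -- Layer 2: 2 JetBlocks (unrolled range(2) loop)
  let r := pvJetblockFlops 32 32 h w 1
  let h := r.2.1; let w := r.2.2; let total_flops := total_flops + r.1
  let r := pvJetblockFlops 32 32 h w 1
  let h := r.2.1; let w := r.2.2; let total_flops := total_flops + r.1
  -- Layer 3
  let r := pvConvFlops 32 64 h w 3 2 1 1
  let h := r.2.1; let w := r.2.2
  let total_flops := total_flops + r.1 + pvBnReluFlops 64 h w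
  let r := pvJetblockFlops 64 64 h w 2
  let h := r.2.1; let w := r.2.2; let total_flops := total_flops + r.1
  let r := pvJetblockFlops 64 64 h w 2
  let h := r.2.1; let w := r.2.2; let total_flops := total_flops + r.1
  -- Layer 4
  let r := pvConvFlops 64 128 h w 3 2 1 1
  let h := r.2.1; let w := r.2.2
  let total_flops := total_flops + r.1 + pvBnReluFlops 128 h w
  let r := pvJetblockFlops 128 128 h w 4
  let h := r.2.1; let w := r.2.2; let total_flops := total_flops + r.1
  let r := pvJetblockFlops 128 128 h w 4
  let h := r.2.1; let w := r.2.2; let total_flops := total_flops + r.1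
  -- Classifier (1x1 conv)
  let r := pvConvFlops 128 num_classes h w 1 1 0 1
  let total_flops := total_flops + r.1
  -- Upsampling
  total_flops + 7 * num_classes * h_in * w_in

-- ===== PORT B =====
-- a layer descriptor: (ci, co, k, stride, pad, dil, m)
def pvLayers (c num_classes : Int) : List (Int × Int × Int × Int × Int × Int × Int) :=
  [ (c, 32, 3, 2, 1, 1, 5),
    (32, 32, 3, 1, 1, 1, 5), (32, 32, 3, 1, 1, 1, 6),
    (32, 32, 3, 1, 1, 1, 5), (32, 32, 3, 1, 1, 1, 6),
    (32, 64, 3, 2, 1, 1, 5),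
    (64, 64, 3, 1, 2, 2, 5), (64, 64, 3, 1, 1, 1, 6),
    (64, 64, 3, 1, 2, 2, 5), (64, 64, 3, 1, 1, 1, 6),
    (64, 128, 3, 2, 1, 1, 5),
    (128, 128, 3, 1, 4, 4, 5), (128, 128, 3, 1, 1, 1, 6),
    (128, 128, 3, 1, 4, 4, 5), (128, 128, 3, 1, 1, 1, 6),
    (128, num_classes, 1, 1, 0, 1, 0) ]

def pvStep (st : Int × Int × Int) (layer : Int × Int × Int × Int × Int × Int × Int) :
    Int × Int × Int :=
  let (total, h, w) := st
  let (ci, co, k, s, p, d, m) := layer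
  let h' := PySem.Int.floordiv (h + 2 * p - d * (k - 1) - 1) s + 1
  let w' := PySem.Int.floordiv (w + 2 * p - d * (k - 1) - 1) s + 1
  (total + (2 * ci * k * k + m) * co * h' * w', h', w')

def calculate_theoretical_flops_alt (input_size : Int × Int × Int) (num_classes : Int) : Int :=
  let c := input_size.1
  let h_in := input_size.2.1
  let w_in := input_size.2.2
  let r := (pvLayers c num_classes).foldl pvStep (0, h_in, w_in)
  r.1 + 7 * num_classes * h_in * w_in

-- ===== PRECONDITION & SPEC =====
def Spec_calculate_theoretical_flops (input_size : Int × Int × Int) (num_classes : Int) (out : Int) : Prop := out = calculate_theoretical_flops_alt input_size num_classes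
instance (input_size : Int × Int × Int) (num_classes : Int) (out : Int) : Decidable (Spec_calculate_theoretical_flops input_size num_classes out) := by unfold Spec_calculate_theoretical_flops; infer_instance

-- ===== CLAIM (what is proved, stated in full; the proofs are below) =====
def Claim_equal_calculate_theoretical_flops : Prop := ∀ (input_size : Int × Int × Int) (num_classes : Int), Dom_calculate_theoretical_flops input_size num_classes → Spec_calculate_theoretical_flops input_size num_classes (calculate_theoretical_flops input_size num_classes)

-- ===== LEMMAS AND PROOFS =====

-- ===== VERDICT (by name: the statement is the Claim_ definition above) =====
set_option maxHeartbeats 4000000 in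
theorem calculate_theoretical_flops_spec : Claim_equal_calculate_theoretical_flops := by
  intro ⟨c, h, w⟩ n _
  show _ = _
  simp only [calculate_theoretical_flops, calculate_theoretical_flops_alt,
    pvConvFlops, pvBnReluFlops, pvJetblockFlops, pvLayers, pvStep, List.foldl]
  ring_nf
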